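-- pv_equiv track=rewrite | github.com/woutdenolf/spectrocrunch | spectrocrunch/materials/compoundsearch.py | search
-- ===== SOURCE A (Python) =====
-- def search(names, name):
--     lname = name.lower()
--     # Contains (case insensitive)
--     ret = [k for k in names if lname in k.lower()]
--     if len(ret) > 1:
--         # Equal (case insensitive)
--         ret2 = [k for k in names if lname == k.lower()]
--         if len(ret2) > 1:
--             # Equal (case sensitive)
--             ret3 = [k for k in names if name == k]
--             if ret3:
--                 ret2 = ret3
--         if ret2:
--             ret = ret2
--     return ret
-- ===== SOURCE B (Python) =====
-- def search(names, name):
--     lname = name.lower()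
--     contains = []
--     eq_ci = []
--     eq_cs = []
--     for k in names:
--         kl = k.lower()
--         if lname in kl:
--             contains.append(k)
--             if lname == kl:
--                 eq_ci.append(k)
--                 if name == k:
--                     eq_cs.append(k)
--     if len(contains) <= 1:
--         return contains
--     best = eq_cs if (len(eq_ci) > 1 and eq_cs) else eq_ci
--     return best if best else contains
-- ===== Notes on version B (the rewrite author's own statement) =====
-- stated objective: alternative
-- what changed: Replaces A's up-to-three separate list-comprehension scans over names with a single pass that builds the contains/equal-ci/equal-cs lists simultaneously, followed by a flat selection on the precomputed lists.
import Mathlib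
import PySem

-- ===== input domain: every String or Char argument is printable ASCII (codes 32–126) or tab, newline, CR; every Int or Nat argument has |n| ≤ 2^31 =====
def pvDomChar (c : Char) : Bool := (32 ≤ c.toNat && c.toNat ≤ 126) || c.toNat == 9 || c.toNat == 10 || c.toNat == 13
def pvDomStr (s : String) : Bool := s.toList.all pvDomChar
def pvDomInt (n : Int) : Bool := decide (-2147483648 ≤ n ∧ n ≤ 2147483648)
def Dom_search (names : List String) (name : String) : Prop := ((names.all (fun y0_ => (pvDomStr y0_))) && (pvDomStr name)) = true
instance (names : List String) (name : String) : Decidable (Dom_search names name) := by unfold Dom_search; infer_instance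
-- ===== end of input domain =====

-- B replaces A's up-to-three separate filtering scans with a single pass building
-- three lists at once, then a flat selection — same result by a different decomposition (objective: alternative).


-- ===== PORT A =====
def search (names : List String) (name : String) : List String :=
  let lname := PySem.Str.lower name
  let ret := names.filter (fun k => PySem.Str.isIn lname (PySem.Str.lower k))
  if ret.length > 1 then
    let ret2 := names.filter (fun k => lname == PySem.Str.lower k)
    let ret2 :=
      if ret2.length > 1 then
        let ret3 := names.filter (fun k => name == k)
        if ret3 ≠ [] then ret3 else ret2
      else ret2
    if ret2 ≠ [] then ret2 else ret
  else ret

-- ===== PORT B =====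
def search_alt (names : List String) (name : String) : List String :=
  let lname := PySem.Str.lower name
  let acc := names.foldl
    (fun (acc : List String × List String × List String) k =>
      let (c, ci, cs) := acc
      let kl := PySem.Str.lower k
      if PySem.Str.isIn lname kl then
        if lname == kl then
          if name == k then (c ++ [k], ci ++ [k], cs ++ [k])
          else (c ++ [k], ci ++ [k], cs)
        else (c ++ [k], ci, cs)
      else acc)
    ([], [], [])
  let contains := acc.1
  let eq_ci := acc.2.1
  let eq_cs := acc.2.2
  if contains.length ≤ 1 then contains
  else
    let best := if eq_ci.length > 1 ∧ eq_cs ≠ [] then eq_cs else eq_ci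
    if best ≠ [] then best else contains

-- ===== PRECONDITION & SPEC =====
def Spec_search (names : List String) (name : String) (out : List String) : Prop := out = search_alt names name
instance (names : List String) (name : String) (out : List String) : Decidable (Spec_search names name out) := by unfold Spec_search; infer_instance

-- ===== CLAIM (what is proved, stated in full; the proofs are below) =====
def Claim_equal_search : Prop := ∀ (names : List String) (name : String), Dom_search names name → Spec_search names name (search names name)

-- ===== LEMMAS AND PROOFS =====

-- name == k implies lname == k.lower(); lname == k.lower() implies lname `in` k.lower()
lemma pv_lower_eq (name k : String) (h : name = k) :
    PySem.Str.lower name = PySem.Str.lower k := by rw [h]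

lemma pv_isIn_self (s t : String) (h : s = t) : PySem.Str.isIn s (t) = true := by
  subst h
  simp [PySem.Str.isIn, PySem.Chars.isIn_iff_infix]

-- the single pass builds exactly the three filtered lists
lemma pv_fold_spec (name : String) (names : List String) (c ci cs : List String) :
    names.foldl
      (fun (acc : List String × List String × List String) k =>
        let (c, ci, cs) := acc
        let kl := PySem.Str.lower k
        if PySem.Str.isIn (PySem.Str.lower name) kl then
          if PySem.Str.lower name == kl then
            if name == k then (c ++ [k], ci ++ [k], cs ++ [k])
            else (c ++ [k], ci ++ [k], cs)
          else (c ++ [k], ci, cs)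
        else acc)
      (c, ci, cs)
    = (c ++ names.filter (fun k => PySem.Str.isIn (PySem.Str.lower name) (PySem.Str.lower k)),
       ci ++ names.filter (fun k => PySem.Str.lower name == PySem.Str.lower k),
       cs ++ names.filter (fun k => name == k)) := by
  induction names generalizing c ci cs with
  | nil => simp
  | cons k ks ih =>
    by_cases hcs : name = k
    · have hci : PySem.Str.lower name = PySem.Str.lower k := pv_lower_eq name k hcs
      have hb1 : PySem.Str.isIn (PySem.Str.lower name) (PySem.Str.lower k) = true :=
        pv_isIn_self _ _ hci
      have hb2 : (PySem.Str.lower name == PySem.Str.lower k) = true := by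
        simp [hci]
      have hb3 : (name == k) = true := by simp [hcs]
      simp only [List.foldl_cons, List.filter_cons, hb1, hb2, hb3, if_true, ih,
        List.append_assoc, List.singleton_append]
    · have hb3 : (name == k) = false := by simp [hcs]
      by_cases hci : PySem.Str.lower name = PySem.Str.lower k
      · have hb1 : PySem.Str.isIn (PySem.Str.lower name) (PySem.Str.lower k) = true :=
          pv_isIn_self _ _ hci
        have hb2 : (PySem.Str.lower name == PySem.Str.lower k) = true := by
          simp [hci]
        simp only [List.foldl_cons, List.filter_cons, hb1, hb2, hb3, if_true,
          Bool.false_eq_true, if_false, ih, List.append_assoc, List.singleton_append]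
      · have hb2 : (PySem.Str.lower name == PySem.Str.lower k) = false := by
          simp [hci]
        by_cases hb1 : PySem.Str.isIn (PySem.Str.lower name) (PySem.Str.lower k) = true
        · simp only [List.foldl_cons, List.filter_cons, hb1, hb2, hb3, if_true,
            Bool.false_eq_true, if_false, ih, List.append_assoc, List.singleton_append]
        · have hb1' : PySem.Str.isIn (PySem.Str.lower name) (PySem.Str.lower k) = false := by
            simpa using hb1
          simp only [List.foldl_cons, List.filter_cons, hb1', hb2, hb3,
            Bool.false_eq_true, if_false, ih]

-- ===== VERDICT (by name: the statement is the Claim_ definition above) =====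
theorem search_spec : Claim_equal_search := by
  intro names name _
  unfold Spec_search
  simp only [search, search_alt]
  rw [pv_fold_spec name names [] [] []]
  simp only [List.nil_append]
  set ret := names.filter (fun k => PySem.Str.isIn (PySem.Str.lower name) (PySem.Str.lower k)) with hret
  set ret2 := names.filter (fun k => PySem.Str.lower name == PySem.Str.lower k) with hret2
  set ret3 := names.filter (fun k => name == k) with hret3
  by_cases h1 : ret.length > 1
  · have h1' : ¬ ret.length ≤ 1 := by omega
    simp only [h1, h1', if_true, if_false, gt_iff_lt]
    by_cases h2 : ret2.length > 1
    · by_cases h3 : ret3 ≠ []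
      · simp [h2, h3]
      · simp [h2, h3]
    · simp [h2]
  · have h1' : ret.length ≤ 1 := by omega
    simp [h1, h1']
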